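-- pv_equiv track=rewrite | github.com/d14405055-hsieh/2026-python | weeks/week-04/solutions/1114405055/question_10038.py | solve
-- ===== SOURCE A (Python) =====
-- from typing import List
--
-- def is_jolly(seq: List[int]) -> bool:
--     """判斷序列是否為 jolly jumper。"""
--     n = len(seq)
--     if n <= 1:
--         return True
--
--     diffs = set()
--     for i in range(n - 1):
--         d = abs(seq[i] - seq[i + 1])
--         if 1 <= d <= n - 1:
--             diffs.add(d)
--
--     return len(diffs) == n - 1
--
-- def solve(data: str) -> str:
--     tokens = data.split()
--     idx = 0
--     out: List[str] = []
--
--     while idx < len(tokens):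
--         n = int(tokens[idx])
--         idx += 1
--         seq = [int(x) for x in tokens[idx : idx + n]]
--         idx += n
--         out.append("Jolly" if is_jolly(seq) else "Not jolly")
--
--     return "\n".join(out)
-- ===== SOURCE B (Python) =====
-- def solve(data: str) -> str:
--     tokens = data.split()
--     out = []
--     i = 0
--     while i < len(tokens):
--         n = int(tokens[i])
--         seq = [int(x) for x in tokens[i + 1:i + 1 + n]]
--         i += 1 + n
--         diffs = sorted(abs(a - b) for a, b in zip(seq, seq[1:]))
--         out.append("Jolly" if diffs == list(range(1, len(seq))) else "Not jolly")
--     return "\n".join(out)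
-- ===== Notes on version B (the rewrite author's own statement) =====
-- stated objective: alternative
-- what changed: is_jolly no longer accumulates distinct in-range differences into a set and compares the count; B computes all adjacent absolute differences via zip, sorts them once, and compares the sorted list elementwise with list(range(1, n)).
-- outside the precondition, e.g. on solve('-2 5'): A returns 'Jolly\nNot jolly', B returns 'Jolly\nNot jolly'
import Mathlib
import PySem

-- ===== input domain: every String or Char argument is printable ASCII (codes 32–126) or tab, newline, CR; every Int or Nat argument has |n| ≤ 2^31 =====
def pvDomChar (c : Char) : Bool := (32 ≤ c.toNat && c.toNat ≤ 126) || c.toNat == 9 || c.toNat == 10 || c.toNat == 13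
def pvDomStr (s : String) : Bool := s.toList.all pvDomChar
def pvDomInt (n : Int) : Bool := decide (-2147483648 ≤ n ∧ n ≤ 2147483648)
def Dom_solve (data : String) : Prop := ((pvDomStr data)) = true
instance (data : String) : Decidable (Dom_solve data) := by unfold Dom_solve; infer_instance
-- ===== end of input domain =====

-- B replaces A's "collect distinct in-range adjacent differences into a set and compare the count"
-- jolly test by "sort all adjacent absolute differences and compare elementwise with range(1, n)".

-- ===== PORT A =====
def isJolly (seq : List Int) : Bool :=
  let n : Int := seq.length
  if n ≤ 1 then true
  else
    let diffs : PySem.Set Int :=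
      (PySem.List.pyRange 0 (n - 1) 1).foldl
        (fun s i =>
          let d := |PySem.List.pyGetD seq i 0 - PySem.List.pyGetD seq (i + 1) 0|
          if 1 ≤ d ∧ d ≤ n - 1 then PySem.Set.add s d else s)
        PySem.Set.empty
    decide (PySem.Set.len diffs = n - 1)

-- A's while loop over the token cursor; fuel = tokens.length + 1 covers every run in which the
-- counts are nonnegative (inside Pre_ the cursor strictly increases each iteration).
-- On 'none' Python raises ValueError (int()) — those inputs are excluded by Pre_.
def solveLoopA (tokens : List String) : Int → List String → Nat → List String
  | _, out, 0 => out
  | idx, out, fuel + 1 =>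
    if idx < (tokens.length : Int) then
      match (PySem.List.pyGet? tokens idx).bind PySem.Int.ofStr? with
      | none => out
      | some n =>
        match (PySem.List.slice tokens (some (idx + 1)) (some (idx + 1 + n))).mapM PySem.Int.ofStr? with
        | none => out
        | some seq =>
          solveLoopA tokens (idx + 1 + n)
            (out ++ [if isJolly seq then "Jolly" else "Not jolly"]) fuel
    else out

def solve (data : String) : String :=
  let tokens := PySem.Str.split₀ data
  PySem.Str.join "\n" (solveLoopA tokens 0 [] (tokens.length + 1))

-- ===== PORT B =====
def isJollyAlt (seq : List Int) : Bool :=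
  let diffs := (seq.zip (seq.drop 1)).map (fun p => |p.1 - p.2|)
  PySem.List.sorted diffs (fun x => x) false == PySem.List.pyRange 1 (seq.length : Int) 1

-- B's while loop, cursor kept as a Nat; the step 'i += 1 + n' is i + 1 + n.toNat (inside Pre_
-- the count n is nonnegative, so this is exact; on a negative count Python B loops forever,
-- outside Pre_). On 'none' Python raises ValueError — excluded by Pre_.
def solveLoopB (tokens : List String) (i : Nat) (out : List String) : List String :=
  if i < tokens.length then
    match (PySem.List.pyGet? tokens (i : Int)).bind PySem.Int.ofStr? with
    | none => out
    | some n =>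
      match (PySem.List.slice tokens (some ((i : Int) + 1)) (some ((i : Int) + 1 + n))).mapM PySem.Int.ofStr? with
      | none => out
      | some seq =>
        solveLoopB tokens (i + 1 + n.toNat)
          (out ++ [if isJollyAlt seq then "Jolly" else "Not jolly"])
  else out
termination_by tokens.length - i

def solve_alt (data : String) : String :=
  let tokens := PySem.Str.split₀ data
  PySem.Str.join "\n" (solveLoopB tokens 0 [])

-- ===== PRECONDITION & SPEC =====
-- Well-formed token stream: each block is a count that parses as a nonnegative int followed by
-- that many int-parsing tokens (a short final block is fine — A accepts it).
-- Token-stream shape: reading left to right, with k the number of sequence elements still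
-- expected in the current block, every element token parses as an int and every count token
-- parses as a nonnegative int (a short final block is fine — A accepts it).
def wfFrom : List String → Nat → Bool
  | [], _ => true
  | t :: rest, 0 =>
    match PySem.Int.ofStr? t with
    | none => false
    | some n => decide (0 ≤ n) && wfFrom rest n.toNat
  | t :: rest, k + 1 => (PySem.Int.ofStr? t).isSome && wfFrom rest k

-- Pre_ excludes inputs where int() raises ValueError, and inputs with a negative count token:
-- on those A usually loops forever (the cursor moves backwards), and where it does return it does
-- so through Python's negative-slice/negative-index wraparound, an accident of the token format.
def Pre_solve (data : String) : Prop := wfFrom (PySem.Str.split₀ data) 0 = true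
instance (data : String) : Decidable (Pre_solve data) := by unfold Pre_solve; infer_instance

def pvWitness_solve : String := "4 1 4 2 3 1 7 0"

def Spec_solve (data : String) (out : String) : Prop := out = solve_alt data
instance (data : String) (out : String) : Decidable (Spec_solve data out) := by unfold Spec_solve; infer_instance

-- ===== CLAIM (what is proved, stated in full; the proofs are below) =====
def Claim_equal_solve : Prop := ∀ (data : String), Dom_solve data → Pre_solve data → Spec_solve data (solve data)

-- ===== LEMMAS AND PROOFS =====

theorem wfFrom_block : ∀ (rest : List String) (k : Nat), wfFrom rest k = true →
    (∀ x ∈ rest.take k, (PySem.Int.ofStr? x).isSome) ∧ wfFrom (rest.drop k) 0 = true := by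
  intro rest
  induction rest with
  | nil => intro k _; exact ⟨by simp, by simp [wfFrom]⟩
  | cons t rest ih =>
    intro k hk
    cases k with
    | zero => exact ⟨by simp, hk⟩
    | succ k =>
      simp only [wfFrom, Bool.and_eq_true] at hk
      obtain ⟨h1, h2⟩ := hk
      obtain ⟨ha, hd⟩ := ih k h2
      refine ⟨?_, by simpa using hd⟩
      intro x hx
      rcases List.mem_cons.mp (by simpa using hx) with h | h
      · subst h; exact h1
      · exact ha x h

theorem key_iff (ds : List Int) (m : Nat) (hm : ds.length = m) :
    (PySem.Set.ofList (ds.filter (fun d => decide (1 ≤ d ∧ d ≤ (m : Int))))).length = m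
      ↔ PySem.List.sorted ds (fun x => x) false = PySem.List.pyRange 1 ((m : Int) + 1) 1 := by
  have hRlen : (PySem.List.pyRange 1 ((m : Int) + 1) 1).length = m := by
    rw [PySem.List.length_pyRange_one]; omega
  have hRnd : (PySem.List.pyRange 1 ((m : Int) + 1) 1).Nodup := PySem.List.nodup_pyRange_one _ _
  constructor
  · intro h
    have hSnd : (PySem.Set.ofList (ds.filter (fun d => decide (1 ≤ d ∧ d ≤ (m : Int))))).Nodup :=
      PySem.Set.nodup_ofList _
    have hsub1 : (PySem.Set.ofList (ds.filter (fun d => decide (1 ≤ d ∧ d ≤ (m : Int))))) ⊆ ds := by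
      intro x hx
      exact (List.mem_filter.mp ((PySem.Set.mem_ofList _ _).mp hx)).1
    have hperm1 := (List.subperm_of_subset hSnd hsub1).perm_of_length_le (by omega)
    have hsub2 : (PySem.Set.ofList (ds.filter (fun d => decide (1 ≤ d ∧ d ≤ (m : Int)))))
        ⊆ PySem.List.pyRange 1 ((m : Int) + 1) 1 := by
      intro x hx
      have hx2 := (List.mem_filter.mp ((PySem.Set.mem_ofList _ _).mp hx)).2
      simp only [decide_eq_true_eq] at hx2
      exact PySem.List.mem_pyRange_one.mpr ⟨hx2.1, by omega⟩
    have hperm2 := (List.subperm_of_subset hSnd hsub2).perm_of_length_le (by omega)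
    exact PySem.List.sorted_eq_of_perm_of_pairwise_lt _ _ _ (hperm2.symm.trans hperm1)
      (PySem.List.pairwise_lt_pyRange_one _ _)
  · intro h
    have hperm : (PySem.List.pyRange 1 ((m : Int) + 1) 1).Perm ds := by
      rw [← h]; exact PySem.List.sorted_perm _ _ _
    have hnd : ds.Nodup := hperm.nodup_iff.mp hRnd
    have hfil : ds.filter (fun d => decide (1 ≤ d ∧ d ≤ (m : Int))) = ds := by
      apply List.filter_eq_self.mpr
      intro x hx
      have hxR := hperm.mem_iff.mpr hx
      have := PySem.List.mem_pyRange_one.mp hxR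
      simp only [decide_eq_true_eq]
      omega
    rw [hfil, PySem.Set.ofList_eq_self_of_nodup _ hnd, hm]

theorem foldl_ite_add (g : Int → Int) (P : Int → Prop) [DecidablePred P] :
    ∀ (l : List Int) (s : PySem.Set Int),
      l.foldl (fun s i => if P (g i) then PySem.Set.add s (g i) else s) s
        = ((l.map g).filter (fun x => decide (P x))).foldl PySem.Set.add s := by
  intro l
  induction l with
  | nil => intro s; rfl
  | cons x xs ih =>
    intro s
    simp only [List.foldl_cons, List.map_cons, List.filter_cons]
    by_cases h : P (g x) <;> simp [h, ih]

theorem map_range_diffs (seq : List Int) :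
    (PySem.List.pyRange 0 ((seq.length : Int) - 1) 1).map
        (fun i => |PySem.List.pyGetD seq i 0 - PySem.List.pyGetD seq (i + 1) 0|)
      = (seq.zip (seq.drop 1)).map (fun p => |p.1 - p.2|) := by
  rcases seq with _ | ⟨a, rest⟩
  · rfl
  · apply List.ext_getElem
    · simp [PySem.List.length_pyRange_one]
    · intro k h1 h2
      simp only [PySem.List.pyRange_one, List.getElem_map, List.getElem_range]
      have hk : k < rest.length := by
        simpa [PySem.List.length_pyRange_one] using h1
      have e1 : (0 : Int) + (k : Int) = ((k : Nat) : Int) := by omega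
      have e2 : ((k : Nat) : Int) + 1 = (((k+1) : Nat) : Int) := by omega
      rw [e1, e2, PySem.List.pyGetD_natCast, PySem.List.pyGetD_natCast]
      have hk1 : k < (a :: rest).length := by simp; omega
      have hk2 : k + 1 < (a :: rest).length := by simp; omega
      rw [List.getElem_zip]
      simp [List.getD_eq_getElem?_getD, List.getElem?_eq_getElem hk1, hk]

theorem isJolly_eq (seq : List Int) : isJolly seq = isJollyAlt seq := by
  rcases seq with _ | ⟨a, rest⟩
  · rfl
  rcases rest with _ | ⟨b, rest⟩
  · rfl
  have hlen : ((a :: b :: rest).length : Int) = ((rest.length + 1 : Nat) : Int) + 1 := by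
    simp only [List.length_cons]; push_cast; ring
  unfold isJolly isJollyAlt
  simp only []
  rw [if_neg (show ¬ (((a :: b :: rest).length : Int) ≤ 1) by
    simp only [List.length_cons]; push_cast; omega)]
  rw [foldl_ite_add (fun i => |PySem.List.pyGetD (a :: b :: rest) i 0 - PySem.List.pyGetD (a :: b :: rest) (i + 1) 0|)
        (fun x => 1 ≤ x ∧ x ≤ ((a :: b :: rest).length : Int) - 1)]
  rw [map_range_diffs]
  have hm : ((a :: b :: rest).length : Int) - 1 = ((rest.length + 1 : Nat) : Int) := by
    simp only [List.length_cons]; push_cast; ring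
  rw [Bool.eq_iff_iff]
  simp only [decide_eq_true_eq, beq_iff_eq, PySem.Set.len, PySem.Set.empty]
  rw [← PySem.Set.ofList_eq_foldl, hm, hlen]
  exact Iff.trans Int.natCast_inj
    (key_iff _ _ (by simp [List.length_zip]))

theorem mapM_of_all_isSome {α β : Type} (f : α → Option β) :
    ∀ l : List α, (∀ x ∈ l, (f x).isSome) → ∃ ys, l.mapM f = some ys := by
  intro l h
  induction l with
  | nil => exact ⟨[], rfl⟩
  | cons x xs ih =>
    obtain ⟨y, hy⟩ := Option.isSome_iff_exists.mp (h x (by simp))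
    obtain ⟨ys, hys⟩ := ih (fun a ha => h a (by simp [ha]))
    exact ⟨y :: ys, by simp [List.mapM_cons, hy, hys]⟩

theorem loops_eq (tokens : List String) (i : Nat) (out : List String) (fuel : Nat)
    (hwf : wfFrom (tokens.drop i) 0 = true) (hfuel : tokens.length - i < fuel) :
    solveLoopA tokens (i : Int) out fuel = solveLoopB tokens i out := by
  induction fuel generalizing i out with
  | zero => omega
  | succ fuel ih =>
    rw [solveLoopA, solveLoopB]
    by_cases hi : i < tokens.length
    · have hi' : (i : Int) < (tokens.length : Int) := by exact_mod_cast hi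
      rw [if_pos hi', if_pos hi]
      have hdrop : tokens.drop i = tokens[i] :: tokens.drop (i + 1) :=
        (List.getElem_cons_drop hi).symm
      rw [hdrop] at hwf
      simp only [wfFrom] at hwf
      have hget : PySem.List.pyGet? tokens (i : Int) = some tokens[i] := by
        simp [PySem.List.pyGet?_natCast, List.getElem?_eq_getElem hi]
      rw [hget]
      cases hofs : PySem.Int.ofStr? tokens[i] with
      | none => rw [hofs] at hwf; simp at hwf
      | some n =>
        rw [hofs] at hwf
        simp only [Bool.and_eq_true, decide_eq_true_eq] at hwf
        obtain ⟨hn, hblock⟩ := hwf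
        obtain ⟨hall, hwf'⟩ := wfFrom_block _ _ hblock
        simp only [Option.bind_some, hofs]  -- reduce the bind and the count match
        have hslice : PySem.List.slice tokens (some ((i : Int) + 1)) (some ((i : Int) + 1 + n))
            = (tokens.drop (i + 1)).take n.toNat := by
          have h1 : (i : Int) + 1 = ((i + 1 : Nat) : Int) := by push_cast; ring
          have h2 : ((i + 1 : Nat) : Int) + n = ((i + 1 : Nat) : Int) + ((n.toNat : Nat) : Int) := by
            rw [Int.toNat_of_nonneg hn]
          rw [h1, h2, PySem.List.slice_natCast_add]
        rw [hslice]
        obtain ⟨seq, hseq⟩ := mapM_of_all_isSome PySem.Int.ofStr? _ hall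
        have hidx : (i : Int) + 1 + n = ((i + 1 + n.toNat : Nat) : Int) := by
          push_cast [Int.toNat_of_nonneg hn]; ring
        simp only [hseq]
        rw [hidx, isJolly_eq]
        exact ih (i + 1 + n.toNat) _ (by rw [← List.drop_drop] at hwf'; simpa using hwf') (by omega)
    · have hi' : ¬ ((i : Int) < (tokens.length : Int)) := by exact_mod_cast hi
      rw [if_neg hi', if_neg hi]

-- ===== VERDICT (by name: the statement is the Claim_ definition above) =====
theorem solve_spec : Claim_equal_solve := by
  intro data _ hpre
  unfold Spec_solve solve solve_alt
  have h := loops_eq (PySem.Str.split₀ data) 0 [] ((PySem.Str.split₀ data).length + 1)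
    (by simpa using hpre) (by omega)
  simpa using congrArg (PySem.Str.join "\n") h
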